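-- pv_equiv track=rewrite | github.com/cfinley569/Coding-Math | kaprekar_histogram.py | createinput
-- ===== SOURCE A (Python) =====
-- def createinput(num):
--     list1 = []
--     if int(num)<1000:
--         list1.append(0)
--     if int(num)<100:
--         list1.append(0)
--     if int(num)<10:
--         list1.append(0)
--
--     for i in str(num):
--         list1.append(int(i))
--     return list1
-- ===== SOURCE B (Python) =====
-- def createinput(num):
--     n = int(num)
--     digits = []
--     while n > 0:
--         n, r = divmod(n, 10)
--         digits.append(r)
--     digits.reverse()
--     return [0] * max(0, 4 - len(digits)) + digits
-- ===== Notes on version B (the rewrite author's own statement) =====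
-- stated objective: alternative
-- what changed: B never converts the number to a string: it extracts the digits numerically with a while/divmod loop (least-significant first), reverses them, and prepends an arithmetically computed zero pad, instead of A's three magnitude checks plus parsing each character of str(num); Pre_ excludes negative num, where A raises ValueError (int('-')).
import Mathlib
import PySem

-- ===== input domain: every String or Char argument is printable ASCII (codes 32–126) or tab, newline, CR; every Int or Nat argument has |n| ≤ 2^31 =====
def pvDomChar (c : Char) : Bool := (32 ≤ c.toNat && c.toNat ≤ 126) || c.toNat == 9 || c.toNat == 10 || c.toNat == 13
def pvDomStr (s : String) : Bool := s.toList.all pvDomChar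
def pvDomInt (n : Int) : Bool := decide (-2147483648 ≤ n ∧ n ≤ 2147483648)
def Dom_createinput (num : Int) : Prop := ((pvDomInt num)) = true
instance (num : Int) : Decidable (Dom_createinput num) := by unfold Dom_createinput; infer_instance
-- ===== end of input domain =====

-- B extracts the digits arithmetically with a divmod loop (plus reverse and an
-- arithmetic pad) instead of converting to a string and parsing each character
-- (objective: alternative).


-- ===== PORT A =====
-- int(i) on a one-character digit string: PySem.Int.ofChars? [c]; none (ValueError, on '-'
-- of a negative num) is excluded by Pre_, so the .getD 0 default is never reached there.
def createinput (num : Int) : List Int :=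
  let list1 : List Int := []
  let list1 := if num < 1000 then list1 ++ [0] else list1
  let list1 := if num < 100 then list1 ++ [0] else list1
  let list1 := if num < 10 then list1 ++ [0] else list1
  (PySem.Int.toChars num).foldl (fun acc c => acc ++ [(PySem.Int.ofChars? [c]).getD 0]) list1

-- ===== PORT B =====
-- the 'while n > 0: n, r = divmod(n, 10); digits.append(r)' loop of Source B
def digitsLoop (n : Int) : List Int :=
  if 0 < n then PySem.Int.mod n 10 :: digitsLoop (PySem.Int.floordiv n 10) else []
termination_by n.toNat
decreasing_by
  rw [PySem.Int.floordiv_eq_ediv_of_pos (by omega : (0:Int) < 10)]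
  omega

def createinput_alt (num : Int) : List Int :=
  let n := num
  let digits := (digitsLoop n).reverse
  List.replicate (max 0 (4 - (digits.length : Int))).toNat 0 ++ digits

-- ===== PRECONDITION & SPEC =====
-- Pre_ excludes negative num: there str(num) starts with '-' and int('-') raises ValueError in A.
def Pre_createinput (num : Int) : Prop := 0 ≤ num
instance (num : Int) : Decidable (Pre_createinput num) := by unfold Pre_createinput; infer_instance
def pvWitness_createinput : Int := (7)

def Spec_createinput (num : Int) (out : List Int) : Prop := out = createinput_alt num
instance (num : Int) (out : List Int) : Decidable (Spec_createinput num out) := by unfold Spec_createinput; infer_instance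

-- ===== CLAIM (what is proved, stated in full; the proofs are below) =====
def Claim_equal_createinput : Prop := ∀ (num : Int), Dom_createinput num → Pre_createinput num → Spec_createinput num (createinput num)

-- ===== LEMMAS AND PROOFS =====

-- LSB-first digit list of a Nat, shaped like Nat.toDigitsCore's recursion
def natRev (n : Nat) : List Nat :=
  if h : n / 10 = 0 then [n % 10] else n % 10 :: natRev (n / 10)
termination_by n
decreasing_by
  exact Nat.div_lt_self (Nat.pos_of_ne_zero (fun h0 => h (by simp [h0]))) (by omega)

-- lower bound: the number is below base ^ (number of digits printed)
lemma toDigitsCore_lt_pow (b : Nat) (hb : 2 ≤ b) :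
    ∀ f n, n < f → n < b ^ (Nat.toDigitsCore b f n []).length := by
  intro f
  induction f with
  | zero => intro n h; omega
  | succ f ih =>
    intro n hn
    simp only [Nat.toDigitsCore]
    by_cases h : n / b = 0
    · have hnb : n < b := Nat.lt_of_div_eq_zero (by omega) h
      simp [h, pow_one, hnb]
    · rw [if_neg h, Nat.toDigitsCore_lens_eq]
      have hbpos : 0 < b := by omega
      have hne : n ≠ 0 := by intro h0; subst h0; simp at h
      have hdiv : n / b < n := Nat.div_lt_self (Nat.pos_of_ne_zero hne) (by omega)
      have hih := ih (n / b) (by omega)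
      have key : n < b * (n / b + 1) := by
        have h1 := Nat.div_add_mod n b
        have h2 := Nat.mod_lt n hbpos
        have h3 : b * (n / b + 1) = b * (n / b) + b := by ring
        omega
      calc n < b * (n / b + 1) := key
        _ ≤ b * b ^ (Nat.toDigitsCore b f (n / b) []).length :=
              Nat.mul_le_mul (Nat.le_refl b) (Nat.succ_le_of_lt hih)
        _ = b ^ ((Nat.toDigitsCore b f (n / b) []).length + 1) := by ring

lemma toDigits_lt_pow (n : Nat) : n < 10 ^ (Nat.toDigits 10 n).length :=
  toDigitsCore_lt_pow 10 (by omega) (n + 1) n (by omega)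

lemma toDigits_length_pos (n : Nat) : 1 ≤ (Nat.toDigits 10 n).length := by
  by_cases h0 : n = 0
  · subst h0; decide
  · by_contra hcon
    have hlt := toDigits_lt_pow n
    have hz : (Nat.toDigits 10 n).length = 0 := by omega
    rw [hz] at hlt
    simp at hlt
    omega

-- A's foldl-append loop is init ++ map
lemma foldl_append_digits (cs : List Char) (init : List Int) :
    cs.foldl (fun acc c => acc ++ [(PySem.Int.ofChars? [c]).getD 0]) init
      = init ++ cs.map (fun c => (PySem.Int.ofChars? [c]).getD 0) := by
  induction cs generalizing init with
  | nil => simp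
  | cons c cs ih => simp [List.foldl_cons, ih, List.append_assoc]

-- Nat.toDigits is natRev mapped to digit chars and reversed
lemma toDigitsCore_eq_natRev (f : Nat) :
    ∀ n acc, n < f →
      Nat.toDigitsCore 10 f n acc = ((natRev n).map Nat.digitChar).reverse ++ acc := by
  induction f with
  | zero => intro n acc h; omega
  | succ f ih =>
    intro n acc hn
    simp only [Nat.toDigitsCore]
    by_cases h : n / 10 = 0
    · rw [if_pos h, natRev, dif_pos h]
      simp
    · rw [if_neg h, natRev, dif_neg h]
      have hne : n ≠ 0 := fun h0 => h (by simp [h0])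
      have hdiv : n / 10 < n := Nat.div_lt_self (Nat.pos_of_ne_zero hne) (by omega)
      rw [ih (n / 10) _ (by omega)]
      simp [List.append_assoc]

lemma toDigits_eq_natRev (n : Nat) :
    Nat.toDigits 10 n = ((natRev n).map Nat.digitChar).reverse :=
  (by simpa using toDigitsCore_eq_natRev (n + 1) n [] (by omega))

-- every entry of natRev is a digit
lemma natRev_lt_ten (n : Nat) : ∀ d ∈ natRev n, d < 10 := by
  induction n using Nat.strong_induction_on with
  | _ n ih =>
    intro d hd
    rw [natRev] at hd
    by_cases h : n / 10 = 0
    · rw [dif_pos h] at hd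
      simp at hd
      omega
    · rw [dif_neg h] at hd
      rcases List.mem_cons.mp hd with h1 | h1
      · omega
      · have hne : n ≠ 0 := fun h0 => h (by simp [h0])
        exact ih (n / 10) (Nat.div_lt_self (Nat.pos_of_ne_zero hne) (by omega)) d h1

-- parsing a digit char back gives the digit
lemma ofChars_digitChar (d : Nat) (hd : d < 10) :
    (PySem.Int.ofChars? [Nat.digitChar d]).getD 0 = (d : Int) := by
  interval_cases d <;> decide

-- B's divmod loop computes natRev (cast to Int), for positive n
lemma digitsLoop_eq_natRev (n : Nat) (hn : 0 < n) :
    digitsLoop (n : Int) = (natRev n).map (Nat.cast : Nat → Int) := by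
  induction n using Nat.strong_induction_on with
  | _ n ih =>
    rw [digitsLoop, if_pos (by exact_mod_cast hn : (0:Int) < (n:Int))]
    rw [PySem.Int.floordiv_eq_ediv_of_pos (by omega), PySem.Int.mod_eq_emod_of_pos (by omega)]
    have hdivC : ((n : Int)) / 10 = ((n / 10 : Nat) : Int) := by omega
    have hmodC : ((n : Int)) % 10 = ((n % 10 : Nat) : Int) := by omega
    rw [hdivC, hmodC, natRev]
    by_cases h : n / 10 = 0
    · rw [dif_pos h, h]
      rw [digitsLoop]
      simp
    · rw [dif_neg h]
      have hne : n ≠ 0 := fun h0 => h (by simp [h0])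
      rw [ih (n / 10) (Nat.div_lt_self (Nat.pos_of_ne_zero hne) (by omega)) (Nat.pos_of_ne_zero h)]
      simp

-- A's three magnitude checks = replicate of the arithmetic pad count
lemma pad_eq (n : Nat) (L : Nat) (hL1 : 1 ≤ L) (hlt : n < 10 ^ L)
    (hub : ∀ e, 0 < e → n < 10 ^ e → L ≤ e) :
    ((if (n : Int) < 1000 then ([] : List Int) ++ [0] else []) |> fun l1 =>
     (if (n : Int) < 100 then l1 ++ [0] else l1) |> fun l2 =>
     (if (n : Int) < 10 then l2 ++ [0] else l2))
      = List.replicate (max 0 (4 - (L : Int))).toNat 0 := by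
  by_cases h10 : n < 10
  · have : L = 1 := le_antisymm (hub 1 (by omega) (by omega)) hL1
    subst this
    simp only [if_pos (show (n:Int) < 1000 by exact_mod_cast (by omega : n < 1000)),
      if_pos (show (n:Int) < 100 by exact_mod_cast (by omega : n < 100)),
      if_pos (show (n:Int) < 10 by exact_mod_cast h10)]
    decide
  · by_cases h100 : n < 100
    · have hLe : L ≤ 2 := hub 2 (by omega) (by omega)
      have hge : 2 ≤ L := by
        by_contra hcon
        have hple : (10:Nat) ^ L ≤ 10 := by interval_cases L <;> norm_num
        omega
      have : L = 2 := by omega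
      subst this
      simp only [if_pos (show (n:Int) < 1000 by exact_mod_cast (by omega : n < 1000)),
        if_pos (show (n:Int) < 100 by exact_mod_cast h100),
        if_neg (show ¬ (n:Int) < 10 by exact_mod_cast h10)]
      decide
    · by_cases h1000 : n < 1000
      · have hLe : L ≤ 3 := hub 3 (by omega) (by omega)
        have hge : 3 ≤ L := by
          by_contra hcon
          have hple : (10:Nat) ^ L ≤ 100 := by interval_cases L <;> norm_num
          omega
        have : L = 3 := by omega
        subst this
        simp only [if_pos (show (n:Int) < 1000 by exact_mod_cast h1000),
          if_neg (show ¬ (n:Int) < 100 by exact_mod_cast h100),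
          if_neg (show ¬ (n:Int) < 10 by exact_mod_cast h10)]
        decide
      · have hge : 4 ≤ L := by
          by_contra hcon
          interval_cases L <;> simp_all <;> omega
        simp only [if_neg (show ¬ (n:Int) < 1000 by exact_mod_cast h1000),
          if_neg (show ¬ (n:Int) < 100 by exact_mod_cast h100),
          if_neg (show ¬ (n:Int) < 10 by exact_mod_cast h10)]
        have h4 : (4 - (L : Int)) ≤ 0 := by omega
        rw [max_eq_left h4]
        simp

-- ===== VERDICT (by name: the statement is the Claim_ definition above) =====
theorem createinput_spec : Claim_equal_createinput := by
  intro num _ hpre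
  replace hpre : 0 ≤ num := hpre
  by_cases h0 : num = 0
  · subst h0
    unfold Spec_createinput
    have hdl : digitsLoop 0 = [] := by rw [digitsLoop]; simp
    simp [createinput, createinput_alt, hdl, PySem.Int.toChars, Nat.toDigits, Nat.toDigitsCore]
    decide
  · unfold Spec_createinput createinput createinput_alt
    have hnn : ¬ num < 0 := by omega
    simp only [PySem.Int.toChars, if_neg hnn]
    rw [foldl_append_digits]
    have hnum : num = ((num.toNat : Nat) : Int) := by omega
    set n := num.toNat with hn
    have hnpos : 0 < n := by omega
    -- the digit parts agree
    have hdigits : (Nat.toDigits 10 n).map (fun c => (PySem.Int.ofChars? [c]).getD 0)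
        = (digitsLoop num).reverse := by
      rw [toDigits_eq_natRev, hnum, digitsLoop_eq_natRev n hnpos]
      rw [List.map_reverse, List.map_map]
      congr 1
      apply List.map_congr_left
      intro d hd
      have hd10 : d < 10 := natRev_lt_ten n d hd
      simp [Function.comp, ofChars_digitChar d hd10]
    -- the pad parts agree
    have hL1 : 1 ≤ (Nat.toDigits 10 n).length := toDigits_length_pos n
    have h2 : n < 10 ^ (Nat.toDigits 10 n).length := toDigits_lt_pow n
    have h3 : ∀ e, 0 < e → n < 10 ^ e → (Nat.toDigits 10 n).length ≤ e :=
      fun e he hlt => Nat.toDigits_length 10 n e he hlt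
    have hpad := pad_eq n (Nat.toDigits 10 n).length hL1 h2 h3
    have hlen : ((digitsLoop num).reverse).length = (Nat.toDigits 10 n).length := by
      rw [← hdigits, List.length_map]
    rw [← hdigits] at *
    rw [hlen]
    simp only [hnum] at hpad ⊢
    rw [← hpad]
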